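-- pv_equiv track=rewrite | github.com/kwshi/aoc-2020 | solutions/python/14.py | variations
-- ===== SOURCE A (Python) =====
-- def variations(mask, n, i=0):
--     if i == len(mask):
--         yield n
--         return
--     c = mask[-(i+1)]
--     if c == 'X':
--         yield from variations(mask, n | 1<<i, i+1)
--         yield from variations(mask, n & ~(1<<i), i+1)
--     elif c == '0':
--         yield from variations(mask, n, i+1)
--     elif c == '1':
--         yield from variations(mask, n | 1<<i, i+1)
-- ===== SOURCE B (Python) =====
-- def variations(mask, n, i=0):
--     # Iterative breadth-first expansion: one pass over bit positions,
--     # maintaining the list of all values built so far.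
--     vs = [n]
--     for p in range(i, len(mask)):
--         c = mask[-(p + 1)]
--         if c == 'X':
--             vs = [w for v in vs for w in (v | 1 << p, v & ~(1 << p))]
--         elif c == '1':
--             vs = [v | 1 << p for v in vs]
--         elif c != '0':
--             vs = []
--     yield from vs
-- ===== Notes on version B (the rewrite author's own statement) =====
-- stated objective: alternative
-- what changed: Replaces A's depth-first recursive generator by a single iterative pass over the bit positions that maintains the breadth-first worklist of all values built so far (flat-map expansion at 'X' bits), yielding the finished list at the end.
import Mathlib
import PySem

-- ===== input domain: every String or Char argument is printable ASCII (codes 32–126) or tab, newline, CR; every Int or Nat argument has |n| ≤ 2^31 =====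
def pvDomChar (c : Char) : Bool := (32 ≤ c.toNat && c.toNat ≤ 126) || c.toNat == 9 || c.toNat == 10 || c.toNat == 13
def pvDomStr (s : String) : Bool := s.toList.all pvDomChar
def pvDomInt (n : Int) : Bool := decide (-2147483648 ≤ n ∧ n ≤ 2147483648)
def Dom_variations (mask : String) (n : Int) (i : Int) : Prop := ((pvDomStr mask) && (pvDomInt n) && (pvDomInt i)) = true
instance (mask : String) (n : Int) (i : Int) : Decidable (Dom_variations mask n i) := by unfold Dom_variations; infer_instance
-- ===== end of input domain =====

-- B replaces A's depth-first recursive generator by a single iterative pass over the bit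
-- positions that maintains the breadth-first list of all values built so far (objective:
-- alternative decomposition; not claimed faster).


-- ===== PORT A =====
-- termination helper for the port: a successful negative-index lookup mask[-(i+1)] forces i < len(mask)
theorem pv_lt_of_pyGet (mask : String) (i : Int) (c : Char)
    (h : PySem.Str.pyGet? mask (-(i+1)) = some c) : i < PySem.Str.len mask := by
  have h' : PySem.List.pyGet? mask.toList (-(i+1)) = some c := by simpa [pysem] using h
  have hin : PySem.Raise.InRange mask.toList.length (-(i+1)) := by
    by_contra hno
    rw [← PySem.List.pyGet?_eq_none_iff] at hno
    rw [hno] at h'; cases h'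
  rw [PySem.Raise.InRange] at hin
  rw [PySem.Str.len_eq]
  omega

-- port of A: the recursive generator, materialised as the list of its yields in order
-- ('1 <<< i.toNat' is Python's '1 << i'; exact for 0 ≤ i, and Python raises ValueError on i < 0,
-- which Pre_ excludes wherever a shift is reached)
def variations (mask : String) (n : Int) (i : Int) : List Int :=
  if i = PySem.Str.len mask then [n]
  else
    match h : PySem.Str.pyGet? mask (-(i+1)) with
    | none => []          -- IndexError in Python (excluded by Pre_)
    | some c =>
      if c = 'X' then
        variations mask (PySem.Int.bor n ((1:Int) <<< i.toNat)) (i+1) ++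
        variations mask (PySem.Int.band n (Int.not ((1:Int) <<< i.toNat))) (i+1)
      else if c = '0' then
        variations mask n (i+1)
      else if c = '1' then
        variations mask (PySem.Int.bor n ((1:Int) <<< i.toNat)) (i+1)
      else []             -- no branch matches: the generator yields nothing
termination_by (PySem.Str.len mask - i).toNat
decreasing_by
  all_goals (have := pv_lt_of_pyGet mask i c h; omega)

-- ===== PORT B =====
-- one iteration of Source B's loop body at position p
def altStep (mask : String) (vs : List Int) (p : Int) : List Int :=
  match PySem.Str.pyGet? mask (-(p+1)) with
  | none => []            -- IndexError in Python (excluded by Pre_)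
  | some c =>
    if c = 'X' then
      vs.flatMap (fun v => [PySem.Int.bor v ((1:Int) <<< p.toNat),
                            PySem.Int.band v (Int.not ((1:Int) <<< p.toNat))])
    else if c = '1' then
      vs.map (fun v => PySem.Int.bor v ((1:Int) <<< p.toNat))
    else if c ≠ '0' then []
    else vs

def variations_alt (mask : String) (n : Int) (i : Int) : List Int :=
  (PySem.List.pyRange i (PySem.Str.len mask) 1).foldl (altStep mask) [n]

-- ===== PRECONDITION & SPEC =====
-- the wrapped characters a negative starting index i scans before reaching position 0,
-- with the leading '0's (which leave n untouched) removed
def pvScan (mask : String) (i : Int) : List Char :=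
  ((mask.toList.take (-i).toNat).reverse).dropWhile (fun c => c = '0')
-- Pre_ is exactly the set of inputs on which A returns: it excludes i > len(mask) and
-- i < -len(mask) (IndexError) and the negative i whose wrapped scan meets an 'X' or '1'
-- before any non-mask character (ValueError from the negative shift 1 << i).
def Pre_variations (mask : String) (n : Int) (i : Int) : Prop :=
  (0 ≤ i ∧ i ≤ PySem.Str.len mask) ∨
  (i < 0 ∧ -i ≤ PySem.Str.len mask ∧
    (pvScan mask i).head? ≠ some 'X' ∧ (pvScan mask i).head? ≠ some '1')
instance (mask : String) (n : Int) (i : Int) : Decidable (Pre_variations mask n i) := by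
  unfold Pre_variations; infer_instance

def pvWitness_variations : String × Int × Int := ("X01", 5, 0)

def Spec_variations (mask : String) (n : Int) (i : Int) (out : List Int) : Prop := out = variations_alt mask n i
instance (mask : String) (n : Int) (i : Int) (out : List Int) : Decidable (Spec_variations mask n i out) := by unfold Spec_variations; infer_instance

-- ===== CLAIM (what is proved, stated in full; the proofs are below) =====
def Claim_equal_variations : Prop := ∀ (mask : String) (n : Int) (i : Int), Dom_variations mask n i → Pre_variations mask n i → Spec_variations mask n i (variations mask n i)

-- ===== LEMMAS AND PROOFS =====

-- in range, the lookup succeeds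
theorem pv_pyGet_isSome (mask : String) (i : Int) (h0 : 0 ≤ i) (h1 : i < PySem.Str.len mask) :
    (PySem.Str.pyGet? mask (-(i+1))).isSome := by
  rw [PySem.Str.len_eq] at h1
  have : PySem.Str.pyGet? mask (-(i+1)) ≠ none := by
    intro hno
    have : PySem.List.pyGet? mask.toList (-(i+1)) = none := by simpa [pysem] using hno
    rw [PySem.List.pyGet?_eq_none_iff, PySem.Raise.InRange] at this
    omega
  exact Option.isSome_iff_ne_none.mpr this

-- at i = len(mask) the generator yields exactly n
theorem variations_base (mask : String) (n : Int) :
    variations mask n (PySem.Str.len mask) = [n] := by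
  rw [variations]; simp

-- one unfolding of A's recursion below the base case, with the looked-up character supplied
theorem variations_unfold (mask : String) (v : Int) (i : Int) (c : Char)
    (hne : i ≠ PySem.Str.len mask) (hc : PySem.Str.pyGet? mask (-(i+1)) = some c) :
    variations mask v i =
      (if c = 'X' then
        variations mask (PySem.Int.bor v ((1:Int) <<< i.toNat)) (i+1) ++
        variations mask (PySem.Int.band v (Int.not ((1:Int) <<< i.toNat))) (i+1)
      else if c = '0' then variations mask v (i+1)
      else if c = '1' then variations mask (PySem.Int.bor v ((1:Int) <<< i.toNat)) (i+1)
      else []) := by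
  rw [variations, if_neg hne]
  split
  · next heq => rw [hc] at heq; cases heq
  · next c' heq => rw [hc] at heq; injection heq with h; subst h; rfl

-- one iteration of Source B's loop body, with the looked-up character supplied
theorem altStep_eq (mask : String) (vs : List Int) (p : Int) (c : Char)
    (hc : PySem.Str.pyGet? mask (-(p+1)) = some c) :
    altStep mask vs p =
      (if c = 'X' then
        vs.flatMap (fun v => [PySem.Int.bor v ((1:Int) <<< p.toNat),
                              PySem.Int.band v (Int.not ((1:Int) <<< p.toNat))])
      else if c = '1' then vs.map (fun v => PySem.Int.bor v ((1:Int) <<< p.toNat))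
      else if c ≠ '0' then [] else vs) := by
  rw [altStep]
  split
  · next heq => rw [hc] at heq; cases heq
  · next c' heq => rw [hc] at heq; injection heq with h; subst h; rfl

-- loop invariant: running Source B's loop from position i on the worklist vs produces, in order,
-- A's yields for each element of vs
theorem pv_foldl_eq (mask : String) : ∀ (k : Nat) (i : Int) (vs : List Int),
    0 ≤ i → i ≤ PySem.Str.len mask → (PySem.Str.len mask - i).toNat = k →
    (PySem.List.pyRange i (PySem.Str.len mask) 1).foldl (altStep mask) vs =
      vs.flatMap (fun v => variations mask v i) := by
  intro k
  induction k with
  | zero =>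
    intro i vs h0 h1 hk
    have hi : i = PySem.Str.len mask := by omega
    subst hi
    rw [PySem.List.pyRange_one_eq_nil le_rfl, List.foldl_nil]
    have hfun : (fun v => variations mask v (PySem.Str.len mask)) = fun v : Int => [v] :=
      funext (variations_base mask)
    rw [hfun, List.flatMap_singleton']
  | succ k ih =>
    intro i vs h0 h1 hk
    have hlt : i < PySem.Str.len mask := by omega
    rw [PySem.List.pyRange_one_cons hlt, List.foldl_cons]
    obtain ⟨c, hc⟩ := Option.isSome_iff_exists.mp (pv_pyGet_isSome mask i h0 hlt)
    have hvar : ∀ v, variations mask v i = _ :=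
      fun v => variations_unfold mask v i c (by omega) hc
    rw [ih (i+1) _ (by omega) (by omega) (by omega), altStep_eq mask vs i c hc]
    by_cases hX : c = 'X'
    · rw [if_pos hX, List.flatMap_assoc]
      refine List.flatMap_congr fun v _ => ?_
      rw [hvar v, if_pos hX]
      simp
    · by_cases h1' : c = '1'
      · rw [if_neg hX, if_pos h1', List.flatMap_map]
        refine List.flatMap_congr fun v _ => ?_
        rw [hvar v, if_neg hX]
        subst h1'
        rw [if_neg (by decide : ¬ ('1' : Char) = '0'), if_pos rfl]
      · by_cases h0' : c = '0'
        · rw [if_neg hX, if_neg h1', if_neg (by simp [h0'])]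
          refine List.flatMap_congr fun v _ => ?_
          rw [hvar v, if_neg hX, if_pos h0']
        · rw [if_neg hX, if_neg h1', if_pos h0', List.flatMap_nil]
          symm
          refine List.flatMap_eq_nil_iff.mpr fun v _ => ?_
          rw [hvar v, if_neg hX, if_neg h0', if_neg h1']

-- once the worklist is empty it stays empty
theorem pv_foldl_nil (mask : String) : ∀ l : List Int, l.foldl (altStep mask) [] = [] := by
  intro l
  induction l with
  | nil => rfl
  | cons p l ih =>
    rw [List.foldl_cons]
    have hstep : altStep mask [] p = [] := by
      rw [altStep]
      split
      · rfl
      · split_ifs <;> rfl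
    rw [hstep, ih]

-- a negative index i reads the character mask[-(i+1)], which heads the reversed prefix pvScan is built from
theorem pv_take_rev (mask : String) (i : Int) (hi : i < 0) (hl : -i ≤ PySem.Str.len mask) :
    ∃ c, PySem.Str.pyGet? mask (-(i+1)) = some c ∧
      (mask.toList.take (-i).toNat).reverse = c :: (mask.toList.take (-(i+1)).toNat).reverse := by
  rw [PySem.Str.len_eq] at hl
  have hklen : (-(i+1)).toNat < mask.toList.length := by omega
  refine ⟨mask.toList[(-(i+1)).toNat], ?_, ?_⟩
  · have hb : PySem.Str.pyGet? mask (-(i+1)) = PySem.List.pyGet? mask.toList (-(i+1)) := by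
      simp [pysem]
    rw [hb, PySem.List.pyGet?_of_nonneg mask.toList (by omega : (0:Int) ≤ -(i+1))]
    exact List.getElem?_eq_getElem hklen
  · have hk : (-i).toNat = (-(i+1)).toNat + 1 := by omega
    rw [hk, List.take_add_one, List.getElem?_eq_getElem hklen]
    simp

-- on a surviving negative start (only '0's, or a non-mask character before any 'X'/'1'),
-- Source B's loop agrees with A's recursion
theorem pv_neg_eq (mask : String) (n : Int) : ∀ (k : Nat) (i : Int),
    i < 0 → -i ≤ PySem.Str.len mask → (-i).toNat = k →
    (pvScan mask i).head? ≠ some 'X' → (pvScan mask i).head? ≠ some '1' →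
    (PySem.List.pyRange i (PySem.Str.len mask) 1).foldl (altStep mask) [n] =
      variations mask n i := by
  intro k
  induction k with
  | zero => intro i hi _ hk _ _; omega
  | succ k ih =>
    intro i hi hl hk hX h1
    obtain ⟨c, hc, hrev⟩ := pv_take_rev mask i hi hl
    have hlen0 : (0:Int) ≤ PySem.Str.len mask := by rw [PySem.Str.len_eq]; omega
    have hlt : i < PySem.Str.len mask := by omega
    rw [PySem.List.pyRange_one_cons hlt, List.foldl_cons, altStep_eq mask [n] i c hc,
      variations_unfold mask n i c (by omega) hc]
    by_cases h0 : c = '0'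
    · have hscan : pvScan mask i = pvScan mask (i+1) := by
        unfold pvScan
        rw [hrev, List.dropWhile_cons_of_pos (by simp [h0])]
      subst h0
      rw [if_neg (show ¬(('0':Char) = 'X') by decide)]
      rw [if_neg (show ¬(('0':Char) = '1') by decide)]
      rw [if_neg (show ¬(('0':Char) ≠ '0') by decide)]
      rw [if_neg (show ¬(('0':Char) = 'X') by decide)]
      rw [if_pos (show ('0':Char) = '0' by decide)]
      rcases eq_or_lt_of_le (by omega : i + 1 ≤ 0) with hz | hneg
      · rw [hz, pv_foldl_eq mask (PySem.Str.len mask).toNat 0 [n] le_rfl hlen0 (by omega)]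
        simp
      · exact ih (i+1) (by omega) (by omega) (by omega)
          (by rw [← hscan]; exact hX) (by rw [← hscan]; exact h1)
    · have hhead : (pvScan mask i).head? = some c := by
        unfold pvScan
        rw [hrev, List.dropWhile_cons_of_neg (by simp [h0])]
        rfl
      have hcX : c ≠ 'X' := by intro h; rw [h] at hhead; exact hX hhead
      have hc1 : c ≠ '1' := by intro h; rw [h] at hhead; exact h1 hhead
      rw [if_neg hcX, if_neg hc1, if_pos h0, if_neg hcX, if_neg h0, if_neg hc1,
        pv_foldl_nil]

-- ===== VERDICT (by name: the statement is the Claim_ definition above) =====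
theorem variations_spec : Claim_equal_variations := by
  intro mask n i _ hpre
  unfold Spec_variations variations_alt
  rcases hpre with ⟨h0, h1⟩ | ⟨hi, hl, hX, h1'⟩
  · rw [pv_foldl_eq mask (PySem.Str.len mask - i).toNat i [n] h0 h1 rfl]
    simp
  · rw [pv_neg_eq mask n (-i).toNat i hi hl rfl hX h1']
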